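-- pv_equiv track=rewrite | github.com/Yeyeong99/study_for_basic | Algorithm/Yuchan/25-03-10/2117_sw/2117_sw.py | get_rhombus
-- ===== SOURCE A (Python) =====
-- def get_K(M, house_count):
--     k_list = []
--     k = 1
--     while M * house_count >= (k * k) + (k - 1) * (k - 1):
--         k_list.append(k)
--         k += 1
--     return k_list
--
-- def get_rhombus(arr, i, j, N, M):
--     max_house = 0
--
--     total_houses = 0
--     for row in arr:
--         total_houses += sum(row)
--     k_list = get_K(M, total_houses)
--
--     for k in reversed(k_list):
--         house_count = 0
--         for p in range(N):
--             for q in range(N):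
--                 if abs(i - p) + abs(j - q) <= (k - 1):
--                     house_count += arr[p][q]
--         if M * house_count >= (k * k) + (k - 1) * (k - 1):
--             if house_count > max_house:
--                 max_house = house_count
--
--     return max_house
-- ===== SOURCE B (Python) =====
-- def get_rhombus(arr, i, j, N, M):
--     total = 0
--     for row in arr:
--         total += sum(row)
--     bucket = {}
--     for p in range(min(N, len(arr))):
--         row = arr[p]
--         for q in range(min(N, len(row))):
--             d = abs(i - p) + abs(j - q)
--             bucket[d] = bucket.get(d, 0) + row[q]
--     best = 0
--     cum = 0
--     k = 1
--     while M * total >= k * k + (k - 1) * (k - 1):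
--         cum += bucket.get(k - 1, 0)
--         if M * cum >= k * k + (k - 1) * (k - 1) and cum > best:
--             best = cum
--         k += 1
--     return best
-- ===== Notes on version B (the rewrite author's own statement) =====
-- stated objective: alternative
-- what changed: B makes one pass over the grid bucketing house values by Manhattan distance from (i,j) into a dict and then scans the candidate sizes k once with a running prefix sum, instead of A's full N^2 grid re-scan for every candidate k.
-- outside the precondition, e.g. on get_rhombus([[1]], 5, 5, 2, 1): A returns 0, B returns 0
import Mathlib
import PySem

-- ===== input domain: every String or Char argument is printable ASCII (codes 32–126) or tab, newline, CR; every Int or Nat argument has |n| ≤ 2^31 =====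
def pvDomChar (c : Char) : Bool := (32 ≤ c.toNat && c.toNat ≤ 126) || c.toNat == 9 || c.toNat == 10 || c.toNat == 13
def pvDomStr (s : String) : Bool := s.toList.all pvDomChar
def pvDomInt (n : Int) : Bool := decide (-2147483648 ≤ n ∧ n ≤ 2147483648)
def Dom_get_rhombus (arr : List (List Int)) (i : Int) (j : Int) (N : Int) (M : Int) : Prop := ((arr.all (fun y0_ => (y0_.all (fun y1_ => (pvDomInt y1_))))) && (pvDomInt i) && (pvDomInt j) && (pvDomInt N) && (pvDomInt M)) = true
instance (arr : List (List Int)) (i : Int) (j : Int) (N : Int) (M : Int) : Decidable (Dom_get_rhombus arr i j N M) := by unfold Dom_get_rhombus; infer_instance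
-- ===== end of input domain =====

-- B buckets house values by Manhattan distance in one pass over the grid and scans the
-- candidate sizes k with a running prefix sum instead of re-scanning the grid for every k
-- (objective: alternative algorithm).

-- ===== PORT A =====
-- arr[p][q] (both ports read cells at the same spot; IndexError cases are excluded by Pre_)
def pvCell (arr : List (List Int)) (p q : Int) : Int :=
  PySem.List.pyGetD (PySem.List.pyGetD arr p []) q 0

-- k*k + (k-1)*(k-1) ≥ k for every integer k (termination of the while loops)
theorem pvCost_ge (k : Int) : k ≤ k * k + (k - 1) * (k - 1) := by
  by_cases h : k ≤ 0
  · nlinarith [mul_self_nonneg k, mul_self_nonneg (k - 1)]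
  · nlinarith [mul_self_nonneg (k - 1)]

-- while loop of get_K
def getK_go (M hc k : Int) (acc : List Int) : List Int :=
  if M * hc ≥ k * k + (k - 1) * (k - 1) then getK_go M hc (k + 1) (acc ++ [k]) else acc
termination_by (M * hc + 2 - k).toNat
decreasing_by
  have := pvCost_ge k
  omega

def get_K (M : Int) (house_count : Int) : List Int := getK_go M house_count 1 []

def get_rhombus (arr : List (List Int)) (i : Int) (j : Int) (N : Int) (M : Int) : Int :=
  let total_houses := arr.foldl (fun t row => t + row.sum) 0
  let k_list := get_K M total_houses
  k_list.reverse.foldl (fun max_house k =>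
    let house_count := (PySem.List.pyRange 0 N 1).foldl (fun hc p =>
      (PySem.List.pyRange 0 N 1).foldl (fun hc q =>
        if |i - p| + |j - q| ≤ k - 1 then hc + pvCell arr p q else hc) hc) 0
    if M * house_count ≥ k * k + (k - 1) * (k - 1) then
      if house_count > max_house then house_count else max_house
    else max_house) 0

-- ===== PORT B =====
-- bucket[d] = bucket.get(d, 0) + row[q], one pass over the existing cells of the N×N square
def pvBucket (arr : List (List Int)) (i j N : Int) : PySem.Dict Int Int :=
  (PySem.List.pyRange 0 (min N (arr.length : Int)) 1).foldl (fun b p =>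
    let row := PySem.List.pyGetD arr p []
    (PySem.List.pyRange 0 (min N (row.length : Int)) 1).foldl (fun b q =>
      b.insert (|i - p| + |j - q|) (b.getD (|i - p| + |j - q|) 0 + PySem.List.pyGetD row q 0)) b)
    PySem.Dict.empty

-- the while loop of B: running prefix sum cum, running best
def alt_go (M total k best cum : Int) (bucket : PySem.Dict Int Int) : Int :=
  if M * total ≥ k * k + (k - 1) * (k - 1) then
    let cum' := cum + bucket.getD (k - 1) 0
    alt_go M total (k + 1)
      (if M * cum' ≥ k * k + (k - 1) * (k - 1) ∧ cum' > best then cum' else best) cum' bucket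
  else best
termination_by (M * total + 2 - k).toNat
decreasing_by
  have := pvCost_ge k
  omega

def get_rhombus_alt (arr : List (List Int)) (i : Int) (j : Int) (N : Int) (M : Int) : Int :=
  let total := arr.foldl (fun t row => t + row.sum) 0
  let bucket := pvBucket arr i j N
  alt_go M total 1 0 0 bucket

-- ===== PRECONDITION & SPEC =====
-- Pre_ excludes grids that do not cover the N×N square while some rhombus size is affordable
-- (M·total ≥ 1): there A's arr[p][q] may raise IndexError; on the rare such inputs where the
-- affordable rhombus never reaches a missing cell A still returns, and B agrees there (see cites).
def Pre_get_rhombus (arr : List (List Int)) (i : Int) (j : Int) (N : Int) (M : Int) : Prop :=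
  N ≤ 0 ∨ M * (arr.map List.sum).sum < 1 ∨
    (N ≤ (arr.length : Int) ∧ ∀ row ∈ arr.take N.toNat, N ≤ (row.length : Int))
instance (arr : List (List Int)) (i : Int) (j : Int) (N : Int) (M : Int) : Decidable (Pre_get_rhombus arr i j N M) := by unfold Pre_get_rhombus; infer_instance

def pvWitness_get_rhombus : List (List Int) × Int × Int × Int × Int := ([[1]], 0, 0, 1, 1)

def Spec_get_rhombus (arr : List (List Int)) (i : Int) (j : Int) (N : Int) (M : Int) (out : Int) : Prop := out = get_rhombus_alt arr i j N M
instance (arr : List (List Int)) (i : Int) (j : Int) (N : Int) (M : Int) (out : Int) : Decidable (Spec_get_rhombus arr i j N M out) := by unfold Spec_get_rhombus; infer_instance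

-- ===== CLAIM (what is proved, stated in full; the proofs are below) =====
def Claim_equal_get_rhombus : Prop := ∀ (arr : List (List Int)) (i : Int) (j : Int) (N : Int) (M : Int), Dom_get_rhombus arr i j N M → Pre_get_rhombus arr i j N M → Spec_get_rhombus arr i j N M (get_rhombus arr i j N M)

-- ===== LEMMAS AND PROOFS =====

-- houses at Manhattan distance ≤ r from (i,j) inside the N×N grid
def pvCnt (arr : List (List Int)) (i j N r : Int) : Int :=
  ((PySem.List.pyRange 0 N 1).map (fun p =>
    ((PySem.List.pyRange 0 N 1).map (fun q =>
      if |i - p| + |j - q| ≤ r then pvCell arr p q else 0)).sum)).sum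

-- houses at Manhattan distance exactly d
def pvBsum (arr : List (List Int)) (i j N d : Int) : Int :=
  ((PySem.List.pyRange 0 N 1).map (fun p =>
    ((PySem.List.pyRange 0 N 1).map (fun q =>
      if |i - p| + |j - q| = d then pvCell arr p q else 0)).sum)).sum

-- A's per-k step, with the double loop replaced by its value pvCnt
def pvStep (arr : List (List Int)) (i j N M : Int) (mh k : Int) : Int :=
  if M * pvCnt arr i j N (k - 1) ≥ k * k + (k - 1) * (k - 1) then
    if pvCnt arr i j N (k - 1) > mh then pvCnt arr i j N (k - 1) else mh
  else mh

theorem foldl_add_shape (L : List Int) (g : Int → Int) (step : Int → Int → Int)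
    (hstep : ∀ h x, step h x = h + g x) : ∀ h0 : Int, L.foldl step h0 = h0 + (L.map g).sum := by
  induction L with
  | nil => intro h0; simp
  | cons a L ih => intro h0; simp [List.foldl_cons, hstep, ih]; ring

theorem count_loop_eq (arr : List (List Int)) (i j N r : Int) :
    (PySem.List.pyRange 0 N 1).foldl (fun hc p =>
      (PySem.List.pyRange 0 N 1).foldl (fun hc q =>
        if |i - p| + |j - q| ≤ r then hc + pvCell arr p q else hc) hc) 0 = pvCnt arr i j N r := by
  have h := foldl_add_shape (PySem.List.pyRange 0 N 1)
    (fun p => ((PySem.List.pyRange 0 N 1).map (fun q =>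
      if |i - p| + |j - q| ≤ r then pvCell arr p q else 0)).sum)
    (fun hc p => (PySem.List.pyRange 0 N 1).foldl (fun hc q =>
      if |i - p| + |j - q| ≤ r then hc + pvCell arr p q else hc) hc)
    (fun h0 p => foldl_add_shape (PySem.List.pyRange 0 N 1)
      (fun q => if |i - p| + |j - q| ≤ r then pvCell arr p q else 0)
      (fun hc q => if |i - p| + |j - q| ≤ r then hc + pvCell arr p q else hc)
      (fun hc q => by dsimp only; split_ifs <;> ring) h0) 0
  simpa [pvCnt] using h

theorem dict_inner (Q : List Int) (key v : Int → Int) (d : Int) :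
    ∀ b : PySem.Dict Int Int,
      (Q.foldl (fun b q => b.insert (key q) (b.getD (key q) 0 + v q)) b).getD d 0
        = b.getD d 0 + (Q.map (fun q => if key q = d then v q else 0)).sum := by
  induction Q with
  | nil => intro b; simp
  | cons q Q ih =>
    intro b
    simp only [List.foldl_cons, List.map_cons, List.sum_cons, ih]
    rw [PySem.Dict.getD_insert]
    split_ifs with h1 h2 h2
    · rw [h2]; ring
    · exact absurd h1.symm h2
    · exact absurd h2.symm h1
    · ring

theorem pvGetD_hi {α : Type} (xs : List α) (n : Int) (d : α) (h : (xs.length : Int) ≤ n) :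
    PySem.List.pyGetD xs n d = d := by
  have hnone : PySem.List.pyGet? xs n = none := by
    rw [PySem.List.pyGet?_eq_none_iff]
    simp [PySem.Raise.InRange]
    omega
  simp [PySem.List.pyGetD, hnone]

theorem sum_clip (f : Int → Int) (N m : Int) (hm : m ≤ N)
    (h0 : ∀ x, m ≤ x → x < N → f x = 0) :
    ((PySem.List.pyRange 0 N 1).map f).sum = ((PySem.List.pyRange 0 m 1).map f).sum := by
  by_cases h : 0 ≤ m
  · rw [PySem.List.pyRange_one_append 0 m N h hm, List.map_append, List.sum_append]
    have htail : ((PySem.List.pyRange m N 1).map f).sum = 0 := by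
      apply List.sum_eq_zero
      intro x hx
      simp only [List.mem_map] at hx
      obtain ⟨y, hy, rfl⟩ := hx
      rw [PySem.List.mem_pyRange_one] at hy
      exact h0 y hy.1 hy.2
    rw [htail, add_zero]
  · rw [PySem.List.pyRange_one_eq_nil (show m ≤ 0 by omega)]
    simp only [List.map_nil, List.sum_nil]
    apply List.sum_eq_zero
    intro x hx
    simp only [List.mem_map] at hx
    obtain ⟨y, hy, rfl⟩ := hx
    rw [PySem.List.mem_pyRange_one] at hy
    exact h0 y (by omega) hy.2

-- the inner full-range sum over row p (the shape pvBsum is made of)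
def pvInner (arr : List (List Int)) (i j N d p : Int) : Int :=
  ((PySem.List.pyRange 0 N 1).map (fun q =>
    if |i - p| + |j - q| = d then pvCell arr p q else 0)).sum

theorem inner_clip (arr : List (List Int)) (i j N d p : Int) :
    ((PySem.List.pyRange 0 (min N ((PySem.List.pyGetD arr p []).length : Int)) 1).map (fun q =>
      if |i - p| + |j - q| = d then PySem.List.pyGetD (PySem.List.pyGetD arr p []) q 0 else 0)).sum
    = pvInner arr i j N d p := by
  unfold pvInner
  rw [sum_clip _ N (min N ((PySem.List.pyGetD arr p []).length : Int)) (min_le_left _ _)]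
  · rfl
  · intro q hq hqN
    have hlen : ((PySem.List.pyGetD arr p []).length : Int) ≤ q := by
      rcases min_choice N ((PySem.List.pyGetD arr p []).length : Int) with h | h <;> rw [h] at hq <;> omega
    simp only [pvCell, pvGetD_hi _ _ _ hlen, ite_self]

theorem bucket_getD (arr : List (List Int)) (i j N : Int) (d : Int) :
    (pvBucket arr i j N).getD d 0 = pvBsum arr i j N d := by
  have h : ∀ (P : List Int) (b : PySem.Dict Int Int),
      (P.foldl (fun b p =>
        (PySem.List.pyRange 0 (min N ((PySem.List.pyGetD arr p []).length : Int)) 1).foldl (fun b q =>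
          b.insert (|i - p| + |j - q|)
            (b.getD (|i - p| + |j - q|) 0 + PySem.List.pyGetD (PySem.List.pyGetD arr p []) q 0)) b) b).getD d 0
      = b.getD d 0 + (P.map (fun p =>
          ((PySem.List.pyRange 0 (min N ((PySem.List.pyGetD arr p []).length : Int)) 1).map (fun q =>
            if |i - p| + |j - q| = d then PySem.List.pyGetD (PySem.List.pyGetD arr p []) q 0 else 0)).sum)).sum := by
    intro P
    induction P with
    | nil => intro b; simp
    | cons p P ih =>
      intro b
      simp only [List.foldl_cons, List.map_cons, List.sum_cons, ih]
      rw [dict_inner (PySem.List.pyRange 0 (min N ((PySem.List.pyGetD arr p []).length : Int)) 1)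
        (fun q => |i - p| + |j - q|) (fun q => PySem.List.pyGetD (PySem.List.pyGetD arr p []) q 0) d b]
      ring
  have hb : (pvBucket arr i j N).getD d 0
      = ((PySem.List.pyRange 0 (min N (arr.length : Int)) 1).map (fun p =>
          ((PySem.List.pyRange 0 (min N ((PySem.List.pyGetD arr p []).length : Int)) 1).map (fun q =>
            if |i - p| + |j - q| = d then PySem.List.pyGetD (PySem.List.pyGetD arr p []) q 0 else 0)).sum)).sum := by
    have := h (PySem.List.pyRange 0 (min N (arr.length : Int)) 1) PySem.Dict.empty
    simpa [pvBucket] using this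
  rw [hb]
  have hin : ∀ p : Int,
      ((PySem.List.pyRange 0 (min N ((PySem.List.pyGetD arr p []).length : Int)) 1).map (fun q =>
        if |i - p| + |j - q| = d then PySem.List.pyGetD (PySem.List.pyGetD arr p []) q 0 else 0)).sum
      = pvInner arr i j N d p := fun p => inner_clip arr i j N d p
  rw [List.map_congr_left (fun p _ => hin p)]
  have hout : ((PySem.List.pyRange 0 N 1).map (pvInner arr i j N d)).sum
      = ((PySem.List.pyRange 0 (min N (arr.length : Int)) 1).map (pvInner arr i j N d)).sum := by
    apply sum_clip _ N _ (min_le_left _ _)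
    intro p hp hpN
    have hlen : (arr.length : Int) ≤ p := by omega
    unfold pvInner
    apply List.sum_eq_zero
    intro x hx
    simp only [List.mem_map] at hx
    obtain ⟨q, hq, rfl⟩ := hx
    rw [PySem.List.mem_pyRange_one] at hq
    have hrow : PySem.List.pyGetD arr p ([] : List Int) = [] := pvGetD_hi arr p [] hlen
    simp only [pvCell, hrow, pvGetD_hi ([] : List Int) q 0 (by simp; omega), ite_self]
  rw [← hout]
  rfl

theorem cnt_neg (arr : List (List Int)) (i j N r : Int) (hr : r < 0) : pvCnt arr i j N r = 0 := by
  unfold pvCnt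
  apply List.sum_eq_zero
  intro x hx
  simp only [List.mem_map] at hx
  obtain ⟨p, _, rfl⟩ := hx
  apply List.sum_eq_zero
  intro y hy
  simp only [List.mem_map] at hy
  obtain ⟨q, _, rfl⟩ := hy
  rw [if_neg]
  have h1 := abs_nonneg (i - p)
  have h2 := abs_nonneg (j - q)
  omega

theorem cnt_step (arr : List (List Int)) (i j N r : Int) :
    pvCnt arr i j N r = pvCnt arr i j N (r - 1) + pvBsum arr i j N r := by
  unfold pvCnt pvBsum
  rw [← PySem.List.sum_map_add_int]
  apply congrArg
  apply List.map_congr_left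
  intro p _
  rw [← PySem.List.sum_map_add_int]
  apply congrArg
  apply List.map_congr_left
  intro q _
  split_ifs <;> omega

theorem step_lcomm (arr : List (List Int)) (i j N M : Int) : ∀ (m a b : Int),
    pvStep arr i j N M (pvStep arr i j N M m a) b = pvStep arr i j N M (pvStep arr i j N M m b) a := by
  intro m a b
  unfold pvStep
  by_cases h1 : M * pvCnt arr i j N (a - 1) ≥ a * a + (a - 1) * (a - 1) <;>
    by_cases h2 : M * pvCnt arr i j N (b - 1) ≥ b * b + (b - 1) * (b - 1) <;>
      simp only [h1, h2, if_pos, if_neg] <;> split_ifs <;> omega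

theorem getK_go_acc (M hc : Int) : ∀ (n : ℕ) (k : Int) (acc : List Int), (M * hc + 2 - k).toNat = n →
    getK_go M hc k acc = acc ++ getK_go M hc k [] := by
  intro n
  induction n using Nat.strong_induction_on with
  | _ n ih =>
    intro k acc hn
    conv_lhs => rw [getK_go]
    conv_rhs => rw [getK_go]
    split_ifs with h
    · have hk := pvCost_ge k
      have hlt : (M * hc + 2 - (k + 1)).toNat < n := by omega
      rw [ih _ hlt (k + 1) (acc ++ [k]) rfl, ih _ hlt (k + 1) ([] ++ [k]) rfl]
      simp
    · simp

-- the foldl of pvStep over the remaining k-range equals B's running loop,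
-- given the prefix-sum invariant cum = pvCnt (k - 2)
theorem foldl_eq_alt (arr : List (List Int)) (i j N M total : Int) :
    ∀ (n : ℕ) (k best cum : Int), (M * total + 2 - k).toNat = n → cum = pvCnt arr i j N (k - 2) →
      (getK_go M total k []).foldl (pvStep arr i j N M) best
        = alt_go M total k best cum (pvBucket arr i j N) := by
  intro n
  induction n using Nat.strong_induction_on with
  | _ n ih =>
    intro k best cum hn hcum
    rw [getK_go, alt_go]
    split_ifs with h
    · have hk := pvCost_ge k
      have hlt : (M * total + 2 - (k + 1)).toNat < n := by omega
      have hcum' : cum + (pvBucket arr i j N).getD (k - 1) 0 = pvCnt arr i j N (k - 1) := by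
        rw [bucket_getD, hcum, cnt_step arr i j N (k - 1)]
        ring_nf
      rw [getK_go_acc M total (M * total + 2 - (k + 1)).toNat (k + 1) ([] ++ [k]) rfl]
      simp only [List.cons_append, List.nil_append, List.foldl_cons]
      have hcum2 : cum + (pvBucket arr i j N).getD (k - 1) 0 = pvCnt arr i j N (k + 1 - 2) := by
        rw [show k + 1 - 2 = k - 1 by ring, hcum']
      rw [ih _ hlt (k + 1) _ _ rfl hcum2]
      congr 1
      rw [hcum']
      unfold pvStep
      split_ifs <;> first | rfl | omega
    · simp
-- ===== VERDICT (by name: the statement is the Claim_ definition above) =====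
theorem get_rhombus_spec : Claim_equal_get_rhombus := by
  intro arr i j N M _ _
  unfold Spec_get_rhombus get_rhombus get_rhombus_alt
  simp only []
  have hfun : (fun (max_house k : Int) =>
      let house_count := (PySem.List.pyRange 0 N 1).foldl (fun hc p =>
        (PySem.List.pyRange 0 N 1).foldl (fun hc q =>
          if |i - p| + |j - q| ≤ k - 1 then hc + pvCell arr p q else hc) hc) 0
      if M * house_count ≥ k * k + (k - 1) * (k - 1) then
        if house_count > max_house then house_count else max_house
      else max_house) = pvStep arr i j N M := by
    funext mh k
    simp only [count_loop_eq arr i j N (k - 1)]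
    rfl
  rw [hfun]
  set total := arr.foldl (fun t row => t + row.sum) 0 with htot
  have hperm : (get_K M total).reverse.Perm (get_K M total) := List.reverse_perm _
  rw [hperm.foldl_eq' (fun x _ y _ z => step_lcomm arr i j N M z x y) 0]
  unfold get_K
  exact foldl_eq_alt arr i j N M total _ 1 0 0 rfl
    (by rw [cnt_neg arr i j N (1 - 2) (by norm_num)])
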